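-- pv_equiv track=rewrite | github.com/relomy/dk_results | src/dk_results/services/snapshot_exporter.py | _build_player_name_lookup
-- ===== SOURCE A (Python) =====
-- from typing import Any
--
-- def _build_player_name_lookup(players: list[Any]) -> dict[str, str]:
--     lookup: dict[str, str] = {}
--     collisions: set[str] = set()
--     for player in players:
--         if not isinstance(player, dict):
--             continue
--         name = str(player.get("name") or "").strip()
--         if not name:
--             continue
--         key = name.lower()
--         if key in lookup and lookup[key] != name:
--             collisions.add(key)
--         else:
--             lookup[key] = name
--     for key in collisions:
--         lookup.pop(key, None)
--     return lookup
-- ===== SOURCE B (Python) =====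
-- from typing import Any
--
--
-- def _build_player_name_lookup(players: list[Any]) -> dict[str, str]:
--     groups: dict[str, set[str]] = {}
--     for player in players:
--         if not isinstance(player, dict):
--             continue
--         name = str(player.get("name") or "").strip()
--         if not name:
--             continue
--         groups.setdefault(name.lower(), set()).add(name)
--     return {key: next(iter(names)) for key, names in groups.items() if len(names) == 1}
-- ===== Notes on version B (the rewrite author's own statement) =====
-- stated objective: alternative
-- what changed: B replaces A's interleaved lookup-plus-collision-set tracking and final pop loop with a group-then-filter decomposition: one pass groups the distinct names per lowercase key, then a comprehension keeps only the singleton groups.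
import Mathlib
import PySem

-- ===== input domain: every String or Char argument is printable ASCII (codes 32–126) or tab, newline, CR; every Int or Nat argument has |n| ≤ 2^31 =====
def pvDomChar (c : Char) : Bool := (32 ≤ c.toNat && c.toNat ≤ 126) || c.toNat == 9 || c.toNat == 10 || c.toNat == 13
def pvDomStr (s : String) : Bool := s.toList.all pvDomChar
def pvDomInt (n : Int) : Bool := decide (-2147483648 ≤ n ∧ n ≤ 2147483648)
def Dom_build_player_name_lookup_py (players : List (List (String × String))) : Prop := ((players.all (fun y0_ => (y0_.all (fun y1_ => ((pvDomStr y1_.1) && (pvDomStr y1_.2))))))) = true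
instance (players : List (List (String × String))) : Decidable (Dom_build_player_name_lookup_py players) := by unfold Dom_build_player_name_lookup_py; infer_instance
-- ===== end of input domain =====

-- B groups names per lowercase key in one pass and then keeps the singleton groups,
-- replacing A's interleaved collision tracking with a group-then-filter decomposition (objective: alternative).

-- ===== PORT A =====
-- one loop iteration of A's `for player in players:` body over the state (lookup, collisions)
def pvStepA (st : PySem.Dict String String × PySem.Set String) (player : List (String × String)) :
    PySem.Dict String String × PySem.Set String :=
  let name := PySem.Str.strip (((PySem.Dict.mk player).get? "name").getD "")
  if name = "" then st
  else
    let key := PySem.Str.lower name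
    match st.1.get? key with
    | some v => if v ≠ name then (st.1, PySem.Set.add st.2 key) else (st.1.insert key name, st.2)
    | none => (st.1.insert key name, st.2)

def build_player_name_lookup_py (players : List (List (String × String))) : List (String × String) :=
  let st := players.foldl pvStepA (PySem.Dict.empty, PySem.Set.empty)
  (st.2.foldl PySem.Dict.erase st.1).items

-- ===== PORT B =====
-- one loop iteration of B's grouping pass: groups.setdefault(key, set()).add(name)
def pvStepB (g : PySem.Dict String (PySem.Set String)) (player : List (String × String)) :
    PySem.Dict String (PySem.Set String) :=
  let name := PySem.Str.strip (((PySem.Dict.mk player).get? "name").getD "")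
  if name = "" then g
  else g.modify (PySem.Str.lower name) PySem.Set.empty (fun s => PySem.Set.add s name)

def build_player_name_lookup_py_alt (players : List (List (String × String))) : List (String × String) :=
  let groups := players.foldl pvStepB PySem.Dict.empty
  groups.items.filterMap (fun p => if PySem.Set.len p.2 = 1 then some (p.1, p.2.headD "") else none)

-- ===== PRECONDITION & SPEC =====
def Spec_build_player_name_lookup_py (players : List (List (String × String))) (out : List (String × String)) : Prop := out = build_player_name_lookup_py_alt players
instance (players : List (List (String × String))) (out : List (String × String)) : Decidable (Spec_build_player_name_lookup_py players out) := by unfold Spec_build_player_name_lookup_py; infer_instance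

-- ===== CLAIM (what is proved, stated in full; the proofs are below) =====
def Claim_equal_build_player_name_lookup_py : Prop := ∀ (players : List (List (String × String))), Dom_build_player_name_lookup_py players → Spec_build_player_name_lookup_py players (build_player_name_lookup_py players)

-- ===== LEMMAS AND PROOFS =====

-- invariant connecting A's state (lookup, collisions) with B's groups:
-- lookup mirrors groups with each group's first name as value, and collisions are
-- exactly the keys whose group has at least two distinct names
def pvInv (l : PySem.Dict String String) (c : PySem.Set String)
    (g : PySem.Dict String (PySem.Set String)) : Prop :=
  l.items = g.items.map (fun p => (p.1, p.2.headD ""))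
  ∧ (∀ p ∈ g.items, p.2 ≠ [])
  ∧ g.keys.Nodup
  ∧ (∀ k, k ∈ c ↔ ∃ p ∈ g.items, p.1 = k ∧ 2 ≤ p.2.length)

lemma pvHeadMem (s : List String) (d : String) (h : s ≠ []) : s.headD d ∈ s := by
  cases s with
  | nil => exact absurd rfl h
  | cons x t => simp

lemma pvTwoLe (s : List String) (a b : String) (ha : a ∈ s) (hb : b ∈ s) (h : a ≠ b) :
    2 ≤ s.length := by
  cases s with
  | nil => simp at ha
  | cons x t =>
    cases t with
    | nil => simp at ha hb; exact absurd (ha.trans hb.symm) h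
    | cons y u => simp

lemma pvHeadAdd (s : List String) (x d : String) (h : s ≠ []) :
    (PySem.Set.add s x).headD d = s.headD d := by
  cases s with
  | nil => exact absurd rfl h
  | cons y t => simp [PySem.Set.add]; split <;> simp

lemma pvAddNe (s : List String) (x : String) : PySem.Set.add s x ≠ [] := by
  simp only [PySem.Set.add]
  split
  · next hcon => intro hnil; rw [hnil] at hcon; simp at hcon
  · simp

lemma pvGetMap (its : List (String × List String)) (k : String) :
    (PySem.Dict.mk (its.map (fun p => (p.1, p.2.headD "")))).get? k
      = ((PySem.Dict.mk its).get? k).map (fun s => s.headD "") := by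
  simp [PySem.Dict.get?, List.find?_map]
  rfl

-- insert of the value already stored leaves the items untouched
lemma pvInsertSelf {ν : Type} (d : PySem.Dict String ν) (k : String) (v : ν)
    (hnd : d.keys.Nodup) (h : d.get? k = some v) : (d.insert k v).items = d.items := by
  have hc : d.contains k = true := by
    rw [PySem.Dict.contains_eq_isSome_get?, h]; rfl
  rw [PySem.Dict.items_insert_of_contains d v hc]
  conv_rhs => rw [← List.map_id d.items]
  apply List.map_congr_left
  intro p hp
  split
  · next heq =>
    have hk : p.1 = k := by simpa using heq
    have h2 : d.get? p.1 = some p.2 := PySem.Dict.get?_of_mem_items d (by simpa using hp) hnd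
    rw [hk, h] at h2
    have h3 : v = p.2 := by simpa using h2
    rw [h3, ← hk]; rfl
  · rfl

-- entries of a nodup-key dict with the looked-up key are the looked-up pair
lemma pvMemEq {ν : Type} (d : PySem.Dict String ν) (hnd : d.keys.Nodup) {k : String} {v : ν}
    (h : d.get? k = some v) : ∀ p ∈ d.items, p.1 = k → p = (k, v) := by
  intro p hp hk
  have h2 : d.get? p.1 = some p.2 := PySem.Dict.get?_of_mem_items d (by simpa using hp) hnd
  rw [hk, h] at h2
  have : v = p.2 := by simpa using h2
  calc p = (p.1, p.2) := rfl
    _ = (k, v) := by rw [hk, ← this]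

-- A's final pop loop is a filter by non-membership in collisions
lemma pvEraseFold (ks : List String) (d : PySem.Dict String String) :
    (ks.foldl PySem.Dict.erase d).items = d.items.filter (fun p => !(ks.contains p.1)) := by
  induction ks generalizing d with
  | nil => simp
  | cons k ks ih =>
    rw [List.foldl_cons, ih]
    simp [PySem.Dict.erase, List.filter_filter]
    apply List.filter_congr
    intro p _
    by_cases h : p.1 = k <;> simp [h]

-- group-then-filter equals A's filtered lookup, entrywise
lemma pvFinal (its : List (String × List String)) (c : List String)
    (h : ∀ p ∈ its, (p.1 ∈ c ↔ 2 ≤ p.2.length) ∧ p.2 ≠ []) :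
    (its.map (fun p => (p.1, p.2.headD ""))).filter (fun p => !(c.contains p.1))
      = its.filterMap (fun p => if PySem.Set.len p.2 = 1 then some (p.1, p.2.headD "") else none) := by
  induction its with
  | nil => simp
  | cons p t ih =>
    have hp := h p (by simp)
    have ht : ∀ q ∈ t, (q.1 ∈ c ↔ 2 ≤ q.2.length) ∧ q.2 ≠ [] := fun q hq => h q (by simp [hq])
    have hlen : p.2.length ≥ 1 := List.length_pos_of_ne_nil hp.2
    by_cases hm : p.1 ∈ c
    · have h2 : 2 ≤ p.2.length := hp.1.mp hm
      have hne : p.2.length ≠ 1 := by omega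
      simpa [hm, List.filterMap_cons, PySem.Set.len, hne] using ih ht
    · have h2 : ¬ 2 ≤ p.2.length := fun hh => hm (hp.1.mpr hh)
      have h1 : p.2.length = 1 := by omega
      simpa [hm, List.filterMap_cons, PySem.Set.len, h1] using ih ht

lemma pvStep (l : PySem.Dict String String) (c : PySem.Set String)
    (g : PySem.Dict String (PySem.Set String)) (player : List (String × String))
    (h : pvInv l c g) :
    pvInv (pvStepA (l, c) player).1 (pvStepA (l, c) player).2 (pvStepB g player) := by
  obtain ⟨h1, h2, h3, h4⟩ := h
  simp only [pvStepA, pvStepB, PySem.Set.empty]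
  by_cases hn : PySem.Str.strip (((PySem.Dict.mk player).get? "name").getD "") = ""
  · simp only [hn, if_pos]
    exact ⟨h1, h2, h3, h4⟩
  · simp only [if_neg hn]
    set name := PySem.Str.strip (((PySem.Dict.mk player).get? "name").getD "") with hname
    set key := PySem.Str.lower name with hkey
    have hndl : l.keys.Nodup := by
      simpa [PySem.Dict.keys, h1, Function.comp] using h3
    have hgm : l.get? key = (g.get? key).map (fun s => s.headD "") := by
      have hl' : l = PySem.Dict.mk (g.items.map (fun p => (p.1, p.2.headD ""))) := by
        cases l with
        | mk its => simpa using h1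
      rw [hl', pvGetMap]
    have hmod : g.modify key ([] : PySem.Set String) (fun s => PySem.Set.add s name)
        = g.insert key (PySem.Set.add (g.getD key ([] : PySem.Set String)) name) := rfl
    cases hg : g.get? key with
    | none =>
      have hl : l.get? key = none := by rw [hgm, hg]; rfl
      have hgc : g.contains key = false := (PySem.Dict.get?_eq_none_iff_contains g key).mp hg
      have hlc : l.contains key = false := (PySem.Dict.get?_eq_none_iff_contains l key).mp hl
      have hknm : key ∉ g.keys := (PySem.Dict.get?_eq_none_iff_not_mem_keys g key).mp hg
      have hgetD : g.getD key ([] : PySem.Set String) = ([] : PySem.Set String) := by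
        rw [PySem.Dict.getD_eq_get?_getD, hg]; rfl
      have hBitems : (g.modify key ([] : PySem.Set String) (fun s => PySem.Set.add s name)).items
          = g.items ++ [(key, [name])] := by
        rw [hmod, hgetD]
        exact PySem.Dict.items_insert_of_not_contains g _ hgc
      have hAitems : (l.insert key name).items = l.items ++ [(key, name)] :=
        PySem.Dict.items_insert_of_not_contains l _ hlc
      simp only [hl]
      refine ⟨?_, ?_, ?_, ?_⟩
      · simp [hAitems, hBitems, h1]
      · intro p hp
        rw [hBitems] at hp
        rcases List.mem_append.mp hp with hp | hp
        · exact h2 p hp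
        · have : p = (key, [name]) := by simpa using hp
          rw [this]; simp
      · have hkeys : (g.modify key ([] : PySem.Set String) (fun s => PySem.Set.add s name)).keys
            = g.keys ++ [key] := by
          rw [hmod, hgetD]
          exact PySem.Dict.keys_insert_of_not_contains g _ hgc
        rw [hkeys]
        rw [List.nodup_append]
        refine ⟨h3, List.nodup_singleton key, ?_⟩
        intro a ha b hb
        have hb' : b = key := by simpa using hb
        intro hab
        exact hknm (hb' ▸ hab ▸ ha)
      · intro k
        rw [hBitems]
        constructor
        · intro hk
          obtain ⟨p, hp, hpk, hplen⟩ := (h4 k).mp hk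
          exact ⟨p, List.mem_append.mpr (Or.inl hp), hpk, hplen⟩
        · rintro ⟨p, hp, hpk, hplen⟩
          rcases List.mem_append.mp hp with hp | hp
          · exact (h4 k).mpr ⟨p, hp, hpk, hplen⟩
          · have : p = (key, [name]) := by simpa using hp
            rw [this] at hplen
            simp at hplen
    | some s =>
      have hs_mem : (key, s) ∈ g.items := PySem.Dict.mem_items_of_get?_eq_some g hg
      have hsne : s ≠ [] := h2 _ hs_mem
      have hl : l.get? key = some (s.headD "") := by rw [hgm, hg]; rfl
      have hgetD : g.getD key ([] : PySem.Set String) = s := by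
        rw [PySem.Dict.getD_eq_get?_getD, hg]; rfl
      have hgc : g.contains key = true := by
        rw [PySem.Dict.contains_eq_isSome_get?, hg]; rfl
      simp only [hl]
      by_cases hv : s.headD "" = name
      · -- A re-inserts the same value; B's add is a no-op: both dicts unchanged
        have hnm : name ∈ s := hv ▸ pvHeadMem s "" hsne
        have hA : l.insert key name = l := by
          apply PySem.Dict.ext
          exact pvInsertSelf l key name hndl (hv ▸ hl)
        have hB : g.modify key ([] : PySem.Set String) (fun s => PySem.Set.add s name) = g := by
          apply PySem.Dict.ext
          rw [hmod, hgetD, PySem.Set.add_of_mem hnm]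
          exact pvInsertSelf g key s h3 hg
        simp only [hv, ne_eq, not_true_eq_false, ite_false, hA, hB]
        exact ⟨h1, h2, h3, h4⟩
      · -- a genuinely different name: A records a collision, B's group grows past one
        have hBitems : (g.modify key ([] : PySem.Set String) (fun s => PySem.Set.add s name)).items
            = g.items.map (fun p => if (p.1 == key) = true then (key, PySem.Set.add s name) else p) := by
          rw [hmod, hgetD]
          exact PySem.Dict.items_insert_of_contains g _ hgc
        have hBkeys : (g.modify key ([] : PySem.Set String) (fun s => PySem.Set.add s name)).keys
            = g.keys := by
          rw [hmod, hgetD]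
          exact PySem.Dict.keys_insert_of_contains g _ hgc
        have hlen2 : 2 ≤ (PySem.Set.add s name).length := by
          by_cases hns : name ∈ s
          · rw [PySem.Set.add_of_mem hns]
            exact pvTwoLe s (s.headD "") name (pvHeadMem s "" hsne) hns hv
          · rw [PySem.Set.add_of_not_mem hns]
            have := List.length_pos_of_ne_nil hsne
            simp; omega
        simp only [hv, ne_eq, not_false_eq_true, ite_true]
        refine ⟨?_, ?_, ?_, ?_⟩
        · rw [hBitems, List.map_map, h1]
          apply List.map_congr_left
          intro p hp
          by_cases hpk : p.1 = key
          · have hps : p = (key, s) := pvMemEq g h3 hg p hp hpk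
            simp only [Function.comp, hpk, beq_self_eq_true, ite_true]
            rw [hps]
            simp only [Prod.mk.injEq, true_and]
            exact (pvHeadAdd s name "" hsne).symm
          · simp [Function.comp, hpk]
        · intro p hp
          rw [hBitems] at hp
          obtain ⟨q, hq, hqi⟩ := List.mem_map.mp hp
          by_cases hqk : q.1 = key
          · rw [← hqi]; simp only [hqk, beq_self_eq_true, ite_true]
            exact pvAddNe s name
          · rw [← hqi]; simp only [beq_iff_eq, hqk, ite_false]
            exact h2 q hq
        · rw [hBkeys]; exact h3
        · intro k
          rw [PySem.Set.mem_add, hBitems]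
          constructor
          · rintro (hk | hk)
            · obtain ⟨p, hp, hpk, hplen⟩ := (h4 k).mp hk
              by_cases hpkey : p.1 = key
              · refine ⟨(key, PySem.Set.add s name), ?_, by simpa using hpkey ▸ hpk, hlen2⟩
                exact List.mem_map.mpr ⟨p, hp, by simp [hpkey]⟩
              · refine ⟨p, ?_, hpk, hplen⟩
                exact List.mem_map.mpr ⟨p, hp, by simp [hpkey]⟩
            · refine ⟨(key, PySem.Set.add s name), ?_, by simp [hk], hlen2⟩
              exact List.mem_map.mpr ⟨(key, s), hs_mem, by simp⟩
          · rintro ⟨q, hq, hqk, hqlen⟩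
            obtain ⟨p, hp, hpi⟩ := List.mem_map.mp hq
            by_cases hpkey : p.1 = key
            · right
              rw [← hqk, ← hpi]
              simp [hpkey]
            · left
              have : q = p := by rw [← hpi]; simp [hpkey]
              exact (h4 k).mpr ⟨p, hp, by rw [← this, hqk], by rw [← this]; exact hqlen⟩

lemma pvFold (players : List (List (String × String)))
    (l : PySem.Dict String String) (c : PySem.Set String)
    (g : PySem.Dict String (PySem.Set String)) (h : pvInv l c g) :
    pvInv (players.foldl pvStepA (l, c)).1 (players.foldl pvStepA (l, c)).2
      (players.foldl pvStepB g) := by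
  induction players generalizing l c g with
  | nil => simpa using h
  | cons p t ih =>
    simp only [List.foldl_cons]
    have := pvStep l c g p h
    have heq : pvStepA (l, c) p = ((pvStepA (l, c) p).1, (pvStepA (l, c) p).2) := rfl
    rw [heq]
    exact ih _ _ _ this

-- ===== VERDICT (by name: the statement is the Claim_ definition above) =====
theorem build_player_name_lookup_py_spec : Claim_equal_build_player_name_lookup_py := by
  intro players _
  unfold Spec_build_player_name_lookup_py build_player_name_lookup_py build_player_name_lookup_py_alt
  have hInv : pvInv PySem.Dict.empty PySem.Set.empty PySem.Dict.empty := by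
    refine ⟨rfl, by simp [PySem.Dict.empty], by simp [PySem.Dict.empty, PySem.Dict.keys], ?_⟩
    intro k; simp [PySem.Set.empty, PySem.Dict.empty]
  have h := pvFold players _ _ _ hInv
  obtain ⟨h1, h2, h3, h4⟩ := h
  set st := players.foldl pvStepA (PySem.Dict.empty, PySem.Set.empty) with hst
  set g := players.foldl pvStepB PySem.Dict.empty with hg
  rw [pvEraseFold, h1]
  apply pvFinal
  intro p hp
  refine ⟨?_, h2 p hp⟩
  constructor
  · intro hm
    obtain ⟨q, hq, hqk, hqlen⟩ := (h4 p.1).mp hm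
    have hnd : (g.items.map Prod.fst).Nodup := h3
    have := List.inj_on_of_nodup_map hnd hq hp (by simpa using hqk)
    rw [← this]; exact hqlen
  · intro hlen
    exact (h4 p.1).mpr ⟨p, hp, rfl, hlen⟩
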